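-- pv_equiv track=rewrite | github.com/gydeme/Capstone | pythonProject/Python Files/clustercategorizer.py | rule_based_labeling
-- ===== SOURCE A (Python) =====
-- def rule_based_labeling(data):
--     """Perform rule-based labeling based on article titles."""
--     labels = {}
--     for idx, item in enumerate(data):
--         properties = item.get("properties", {})
--         title = properties.get("title", "").lower()
--
--         # Apply rules
--         if "(album)" in title or "(song)" in title or "(band)" in title:
--             labels[title] = "music"
--         elif "(footballer)" in title or "(soccer)" in title:
--             labels[title] = "football (soccer)"
--         elif "(american football)" in title or "(baseball)" in title or "(basketball)" in title or "(hockey)" in title: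
--             labels[title] = "sports"
--         elif "(film)" in title or "(actor)" in title or "(actress)" in title:
--             labels[title] = "movies"
--         elif "(politician)" in title or "(president)" in title or "(prime minister)" in title:
--             labels[title] = "politics"
--         elif "(scientist)" in title or "(researcher)" in title:
--             labels[title] = "science"
--         elif "(video game)" in title or "(console)" in title:
--             labels[title] = "videogames"
--         elif "(disaster)" in title or "(mass shooting)" in title or "(war)" in title:
--             labels[title] = "conflicts"
--         elif "(religion)" in title or "(church)" in title or "(temple)" in title:
--             labels[title] = "religion"
--         elif "(tv show)" in title or "(tv series)" in title or "(show)" in title: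
--             labels[title] = "media"
--         else:
--             labels[title] = "unlabeled"  # Default to unlabeled
--     return labels
-- ===== SOURCE B (Python) =====
-- # Scanner approach: tokenize each title into its "(...)" parenthesized tokens in one
-- # character pass and look each token up in a keyword->(priority, category) dict,
-- # keeping the hit of smallest priority (= earliest rule), instead of running 27
-- # substring searches through an if/elif chain.
-- KW = {
--     "(album)": (0, "music"), "(song)": (0, "music"), "(band)": (0, "music"),
--     "(footballer)": (1, "football (soccer)"), "(soccer)": (1, "football (soccer)"),
--     "(american football)": (2, "sports"), "(baseball)": (2, "sports"),
--     "(basketball)": (2, "sports"), "(hockey)": (2, "sports"),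
--     "(film)": (3, "movies"), "(actor)": (3, "movies"), "(actress)": (3, "movies"),
--     "(politician)": (4, "politics"), "(president)": (4, "politics"),
--     "(prime minister)": (4, "politics"),
--     "(scientist)": (5, "science"), "(researcher)": (5, "science"),
--     "(video game)": (6, "videogames"), "(console)": (6, "videogames"),
--     "(disaster)": (7, "conflicts"), "(mass shooting)": (7, "conflicts"),
--     "(war)": (7, "conflicts"),
--     "(religion)": (8, "religion"), "(church)": (8, "religion"),
--     "(temple)": (8, "religion"),
--     "(tv show)": (9, "media"), "(tv series)": (9, "media"), "(show)": (9, "media"),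
-- }
--
-- def rule_based_labeling(data):
--     """Perform rule-based labeling based on article titles."""
--     labels = {}
--     for item in data:
--         title = item.get("properties", {}).get("title", "").lower()
--         best = None
--         token = None
--         for ch in title:
--             if ch == "(":
--                 token = "("
--             elif token is not None:
--                 token += ch
--                 if ch == ")":
--                     hit = KW.get(token)
--                     if hit is not None and (best is None or hit[0] < best[0]):
--                         best = hit
--                     token = None
--         labels[title] = "unlabeled" if best is None else best[1]
--     return labels
-- ===== Notes on version B (the rewrite author's own statement) =====
-- stated objective: alternative
-- what changed: Instead of testing 27 literal substrings per title through an if/elif chain, B makes one character pass over each title extracting its '(...)' parenthesized tokens, looks each token up in a keyword->(priority,category) dict, and keeps the hit of minimal priority (= earliest rule).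
import Mathlib
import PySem

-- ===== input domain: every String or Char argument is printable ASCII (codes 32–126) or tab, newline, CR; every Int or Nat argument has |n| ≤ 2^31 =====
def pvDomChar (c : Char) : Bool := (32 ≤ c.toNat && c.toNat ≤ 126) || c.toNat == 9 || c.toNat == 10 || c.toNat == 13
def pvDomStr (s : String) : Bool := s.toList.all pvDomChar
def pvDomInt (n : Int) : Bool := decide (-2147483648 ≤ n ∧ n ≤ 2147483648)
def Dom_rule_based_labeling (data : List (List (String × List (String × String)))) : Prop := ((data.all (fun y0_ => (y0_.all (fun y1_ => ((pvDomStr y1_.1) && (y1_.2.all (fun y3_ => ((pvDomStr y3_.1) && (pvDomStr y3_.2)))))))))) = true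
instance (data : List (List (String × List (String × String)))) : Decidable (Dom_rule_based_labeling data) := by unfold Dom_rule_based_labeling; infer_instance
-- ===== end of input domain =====

-- B replaces A's 27-substring-test if/elif chain by one character scan per title that
-- extracts the '(...)' tokens and keeps the minimum-priority dictionary hit (alternative
-- algorithm, same behaviour).

-- ===== PORT A =====
-- A's if/elif chain, transliterated branch by branch.
def rule_based_labeling (data : List (List (String × List (String × String)))) : List (String × String) :=
  (data.foldl (fun labels item =>
      let properties := (PySem.Dict.mk item).getD "properties" []
      let title := PySem.Str.lower ((PySem.Dict.mk properties).getD "title" "")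
      if PySem.Str.isIn "(album)" title || PySem.Str.isIn "(song)" title || PySem.Str.isIn "(band)" title then
        labels.insert title "music"
      else if PySem.Str.isIn "(footballer)" title || PySem.Str.isIn "(soccer)" title then
        labels.insert title "football (soccer)"
      else if PySem.Str.isIn "(american football)" title || PySem.Str.isIn "(baseball)" title || PySem.Str.isIn "(basketball)" title || PySem.Str.isIn "(hockey)" title then
        labels.insert title "sports"
      else if PySem.Str.isIn "(film)" title || PySem.Str.isIn "(actor)" title || PySem.Str.isIn "(actress)" title then
        labels.insert title "movies"
      else if PySem.Str.isIn "(politician)" title || PySem.Str.isIn "(president)" title || PySem.Str.isIn "(prime minister)" title then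
        labels.insert title "politics"
      else if PySem.Str.isIn "(scientist)" title || PySem.Str.isIn "(researcher)" title then
        labels.insert title "science"
      else if PySem.Str.isIn "(video game)" title || PySem.Str.isIn "(console)" title then
        labels.insert title "videogames"
      else if PySem.Str.isIn "(disaster)" title || PySem.Str.isIn "(mass shooting)" title || PySem.Str.isIn "(war)" title then
        labels.insert title "conflicts"
      else if PySem.Str.isIn "(religion)" title || PySem.Str.isIn "(church)" title || PySem.Str.isIn "(temple)" title then
        labels.insert title "religion"
      else if PySem.Str.isIn "(tv show)" title || PySem.Str.isIn "(tv series)" title || PySem.Str.isIn "(show)" title then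
        labels.insert title "media"
      else
        labels.insert title "unlabeled")
    PySem.Dict.empty).items

-- ===== PORT B =====
-- B's module-level KW dict: keyword -> (priority, category).
def pvKW : PySem.Dict String (Int × String) :=
  PySem.Dict.mk [
    ("(album)", (0, "music")), ("(song)", (0, "music")), ("(band)", (0, "music")),
    ("(footballer)", (1, "football (soccer)")), ("(soccer)", (1, "football (soccer)")),
    ("(american football)", (2, "sports")), ("(baseball)", (2, "sports")),
    ("(basketball)", (2, "sports")), ("(hockey)", (2, "sports")),
    ("(film)", (3, "movies")), ("(actor)", (3, "movies")), ("(actress)", (3, "movies")),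
    ("(politician)", (4, "politics")), ("(president)", (4, "politics")),
    ("(prime minister)", (4, "politics")),
    ("(scientist)", (5, "science")), ("(researcher)", (5, "science")),
    ("(video game)", (6, "videogames")), ("(console)", (6, "videogames")),
    ("(disaster)", (7, "conflicts")), ("(mass shooting)", (7, "conflicts")),
    ("(war)", (7, "conflicts")),
    ("(religion)", (8, "religion")), ("(church)", (8, "religion")), ("(temple)", (8, "religion")),
    ("(tv show)", (9, "media")), ("(tv series)", (9, "media")), ("(show)", (9, "media"))]

-- one step of B's inner 'for ch in title' loop; state = (best, token)
def pvStep (st : Option (Int × String) × Option (List Char)) (ch : Char) :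
    Option (Int × String) × Option (List Char) :=
  if ch = '(' then (st.1, some ['('])
  else
    match st.2 with
    | none => st
    | some tk =>
      let tk := tk ++ [ch]
      if ch = ')' then
        match pvKW.get? (String.ofList tk) with
        | some hit =>
          (match st.1 with
           | none => some hit
           | some b => if hit.1 < b.1 then some hit else some b, none)
        | none => (st.1, none)
      else (st.1, some tk)

def rule_based_labeling_alt (data : List (List (String × List (String × String)))) : List (String × String) :=
  (data.foldl (fun labels item =>
      let title := PySem.Str.lower ((PySem.Dict.mk ((PySem.Dict.mk item).getD "properties" [])).getD "title" "")
      let best := (title.toList.foldl pvStep (none, none)).1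
      labels.insert title (match best with | none => "unlabeled" | some b => b.2))
    PySem.Dict.empty).items

-- ===== PRECONDITION & SPEC =====
def Spec_rule_based_labeling (data : List (List (String × List (String × String)))) (out : List (String × String)) : Prop := out = rule_based_labeling_alt data
instance (data : List (List (String × List (String × String)))) (out : List (String × String)) : Decidable (Spec_rule_based_labeling data out) := by unfold Spec_rule_based_labeling; infer_instance

-- ===== CLAIM (what is proved, stated in full; the proofs are below) =====
def Claim_equal_rule_based_labeling : Prop := ∀ (data : List (List (String × List (String × String)))), Dom_rule_based_labeling data → Spec_rule_based_labeling data (rule_based_labeling data)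

-- ===== LEMMAS AND PROOFS =====

-- the completed '(...)' tokens B's scanner extracts, as a recursion over the chars
def pvToks : List Char → Option (List Char) → List (List Char)
  | [], _ => []
  | c :: cs, tk =>
    if c = '(' then pvToks cs (some ['('])
    else
      match tk with
      | none => pvToks cs none
      | some t => if c = ')' then (t ++ [c]) :: pvToks cs none else pvToks cs (some (t ++ [c]))

-- the dictionary hits of those tokens
def pvHits (cs : List Char) : List (Int × String) :=
  (pvToks cs none).filterMap (fun tk => pvKW.get? (String.ofList tk))

-- min-priority selection, left-biased on ties (B's running 'best')
def pvSel : List (Int × String) → Option (Int × String)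
  | [] => none
  | p :: S =>
    match pvSel S with
    | none => some p
    | some q => if q.1 < p.1 then some q else some p

def pvComb : Option (Int × String) → Option (Int × String) → Option (Int × String)
  | none, o => o
  | some q, none => some q
  | some q, some p => if p.1 < q.1 then some p else some q

theorem pvComb_none_right (b : Option (Int × String)) : pvComb b none = b := by
  cases b <;> rfl

theorem pvComb_assoc (a b c : Option (Int × String)) :
    pvComb (pvComb a b) c = pvComb a (pvComb b c) := by
  cases a <;> cases b <;> cases c <;> simp only [pvComb] <;> split_ifs <;>
    first | rfl | omega | (simp only [pvComb]; split_ifs <;> first | rfl | omega)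

theorem pvSel_cons (p : Int × String) (S : List (Int × String)) :
    pvSel (p :: S) = pvComb (some p) (pvSel S) := by
  cases h : pvSel S <;> simp [pvSel, pvComb, h]

-- B's char fold = min-priority selection over the extracted tokens' hits
theorem pvFold_eq (cs : List Char) : ∀ (best : Option (Int × String)) (tk : Option (List Char)),
    (cs.foldl pvStep (best, tk)).1 =
      pvComb best (pvSel ((pvToks cs tk).filterMap (fun t => pvKW.get? (String.ofList t)))) := by
  induction cs with
  | nil => intro best tk; simp [pvToks, pvSel, pvComb_none_right]
  | cons c cs ih =>
    intro best tk
    by_cases hc : c = '('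
    · simp [List.foldl_cons, pvStep, pvToks, hc, ih]
    · cases tk with
      | none => simp [List.foldl_cons, pvStep, pvToks, hc, ih]
      | some t =>
        by_cases hp : c = ')'
        · subst hp
          have htok : pvToks (')' :: cs) (some t) = (t ++ [')']) :: pvToks cs none := by
            simp [pvToks, hc]
          cases hget : pvKW.get? (String.ofList (t ++ [')'])) with
          | none =>
            have key : pvStep (best, some t) ')' = (best, none) := by
              simp only [pvStep, if_neg hc]
              rw [hget]
              simp
            rw [List.foldl_cons, key, ih, htok, List.filterMap_cons, hget]
          | some hit =>
            have key : pvStep (best, some t) ')' = (pvComb best (some hit), none) := by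
              simp only [pvStep, if_neg hc]
              rw [hget]
              cases best <;> simp [pvComb]
            rw [List.foldl_cons, key, ih, htok, List.filterMap_cons, hget,
              pvSel_cons, ← pvComb_assoc]
        · have htok : pvToks (c :: cs) (some t) = pvToks cs (some (t ++ [c])) := by
            simp [pvToks, hc, hp]
          have hstep : pvStep (best, some t) c = (best, some (t ++ [c])) := by
            simp [pvStep, hc, hp]
          rw [List.foldl_cons, hstep, ih, htok]

theorem pvSel_eq_none (S : List (Int × String)) : pvSel S = none ↔ S = [] := by
  cases S with
  | nil => simp [pvSel]
  | cons p S =>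
    rw [pvSel_cons]; cases h : pvSel S
    · simp [pvComb]
    · simp only [pvComb]; split_ifs <;> simp

theorem pvSel_spec (S : List (Int × String)) (p : Int × String) (h : pvSel S = some p) :
    p ∈ S ∧ ∀ q ∈ S, p.1 ≤ q.1 := by
  induction S generalizing p with
  | nil => simp [pvSel] at h
  | cons r S ih =>
    rw [pvSel_cons] at h
    cases hS : pvSel S with
    | none =>
      rw [hS] at h; simp [pvComb] at h; subst h
      rw [pvSel_eq_none] at hS; subst hS; simp
    | some q =>
      rw [hS] at h; simp [pvComb] at h
      obtain ⟨hq, hmin⟩ := ih q hS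
      split_ifs at h with hlt
      · injection h with h; subst h
        refine ⟨List.mem_cons_of_mem _ hq, ?_⟩
        intro x hx
        rcases List.mem_cons.mp hx with rfl | hx
        · omega
        · exact hmin x hx
      · injection h with h; subst h
        refine ⟨by simp, ?_⟩
        intro x hx
        rcases List.mem_cons.mp hx with rfl | hx
        · omega
        · exact le_trans (by omega) (hmin x hx)

-- completing a token: scanning mid++[')'] from state '('::u yields the token
theorem pvToks_complete (mid : List Char) : ∀ (cs u : List Char),
    (∀ c ∈ mid, c ≠ '(' ∧ c ≠ ')') → (mid ++ [')']) <+: cs →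
    ('(' :: u ++ mid ++ [')']) ∈ pvToks cs (some ('(' :: u)) := by
  induction mid with
  | nil =>
    intro cs u _ hpre
    obtain ⟨rest, rfl⟩ := hpre
    simp [pvToks]
  | cons m mid ih =>
    intro cs u hm hpre
    obtain ⟨rest, rfl⟩ := hpre
    have hm1 := hm m (by simp)
    have : ('(' :: (u ++ [m]) ++ mid ++ [')']) ∈ pvToks (mid ++ [')'] ++ rest) (some ('(' :: (u ++ [m]))) :=
      ih _ _ (fun c hc => hm c (by simp [hc])) ⟨rest, by simp⟩
    simpa [pvToks, hm1.1, hm1.2, List.append_assoc] using this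

-- any infix occurrence of a well-shaped keyword is extracted, whatever the state
theorem pvToks_of_infix (mid : List Char) (hm : ∀ c ∈ mid, c ≠ '(' ∧ c ≠ ')') :
    ∀ (cs : List Char) (tk : Option (List Char)),
    ('(' :: mid ++ [')']) <:+: cs → ('(' :: mid ++ [')']) ∈ pvToks cs tk := by
  intro cs
  induction cs with
  | nil => intro tk h; simp at h
  | cons c cs ih =>
    intro tk h
    rcases List.infix_cons_iff.mp h with hpre | hinf
    · obtain ⟨rest, hrest⟩ := hpre
      obtain ⟨rfl, hrest⟩ : c = '(' ∧ mid ++ [')'] ++ rest = cs := by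
        cases hrest; exact ⟨rfl, rfl⟩
      have := pvToks_complete mid cs [] hm ⟨rest, by simpa using hrest⟩
      simpa [pvToks] using this
    · -- recursion proceeds with some state; membership follows from ih in every branch
      by_cases hc : c = '('
      · simpa [pvToks, hc] using ih _ hinf
      · cases tk with
        | none => simpa [pvToks, hc] using ih _ hinf
        | some t =>
          by_cases hp : c = ')'
          · simp [pvToks, hp]; exact Or.inr (ih _ hinf)
          · simpa [pvToks, hc, hp] using ih _ hinf

-- conversely, every extracted token is an infix (or completes the pending one)
theorem pvToks_mem (kw : List Char) : ∀ (cs : List Char) (tk : Option (List Char)),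
    kw ∈ pvToks cs tk →
    kw <:+: cs ∨ ∃ t rest, tk = some t ∧ rest ≠ [] ∧ t ++ rest = kw ∧ rest <+: cs := by
  intro cs
  induction cs with
  | nil => intro tk h; simp [pvToks] at h
  | cons c cs ih =>
    intro tk h
    by_cases hc : c = '('
    · simp [pvToks, hc] at h
      rcases ih _ h with hinf | ⟨t, rest, ht, hne, hkw, hpre⟩
      · exact Or.inl (hinf.trans (List.suffix_cons _ _).isInfix)
      · cases ht
        left
        have : kw <+: c :: cs := by
          rw [← hkw, hc]
          exact List.cons_prefix_cons.mpr ⟨rfl, hpre⟩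
        exact this.isInfix
    · cases tk with
      | none =>
        simp [pvToks, hc] at h
        rcases ih _ h with hinf | ⟨t, rest, ht, _⟩
        · exact Or.inl (hinf.trans (List.suffix_cons _ _).isInfix)
        · simp at ht
      | some t =>
        by_cases hp : c = ')'
        · subst hp
          simp [pvToks, hc] at h
          rcases h with rfl | h
          · exact Or.inr ⟨t, [')'], rfl, by simp, rfl, by simp⟩
          · rcases ih _ h with hinf | ⟨t', rest, ht, _⟩
            · exact Or.inl (hinf.trans (List.suffix_cons _ _).isInfix)
            · simp at ht
        · simp [pvToks, hc, hp] at h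
          rcases ih _ h with hinf | ⟨t', rest, ht, hne, hkw, hpre⟩
          · exact Or.inl (hinf.trans (List.suffix_cons _ _).isInfix)
          · obtain rfl : t ++ [c] = t' := by injection ht
            exact Or.inr ⟨t, c :: rest, rfl, by simp, by simpa using hkw,
              List.cons_prefix_cons.mpr ⟨rfl, hpre⟩⟩

-- token membership ↔ substring, for a well-shaped keyword
theorem pvTok_iff (mid cs : List Char) (hm : ∀ c ∈ mid, c ≠ '(' ∧ c ≠ ')') :
    ('(' :: mid ++ [')']) ∈ pvToks cs none ↔ ('(' :: mid ++ [')']) <:+: cs := by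
  constructor
  · intro h
    rcases pvToks_mem _ cs none h with hinf | ⟨t, rest, ht, _⟩
    · exact hinf
    · simp at ht
  · exact pvToks_of_infix mid hm cs none


-- rule table used only by the proofs: category and keywords per priority
def pvCat (r : Int) : String :=
  if r = 0 then "music" else if r = 1 then "football (soccer)" else if r = 2 then "sports" else if r = 3 then "movies" else if r = 4 then "politics" else if r = 5 then "science" else if r = 6 then "videogames" else if r = 7 then "conflicts" else if r = 8 then "religion" else if r = 9 then "media" else "unlabeled"

def pvKwsOf (r : Int) : List String :=
  if r = 0 then ["(album)", "(song)", "(band)"] else if r = 1 then ["(footballer)", "(soccer)"] else if r = 2 then ["(american football)", "(baseball)", "(basketball)", "(hockey)"] else if r = 3 then ["(film)", "(actor)", "(actress)"] else if r = 4 then ["(politician)", "(president)", "(prime minister)"] else if r = 5 then ["(scientist)", "(researcher)"] else if r = 6 then ["(video game)", "(console)"] else if r = 7 then ["(disaster)", "(mass shooting)", "(war)"] else if r = 8 then ["(religion)", "(church)", "(temple)"] else if r = 9 then ["(tv show)", "(tv series)", "(show)"] else []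

def pvFlag (cs : List Char) (r : Int) : Prop := ∃ kw ∈ pvKwsOf r, kw.toList <:+: cs

-- every dictionary hit is a table row whose rule really matched in the title
theorem pvHits_char (cs : List Char) (p : Int × String) (hp : p ∈ pvHits cs) :
    0 ≤ p.1 ∧ p.1 ≤ 9 ∧ p.2 = pvCat p.1 ∧ pvFlag cs p.1 := by
  obtain ⟨tk, htk, hget⟩ := List.mem_filterMap.mp hp
  have hmem := PySem.Dict.mem_items_of_get?_eq_some _ hget
  simp only [pvKW, List.mem_cons, List.not_mem_nil, or_false, Prod.mk.injEq] at hmem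
  rcases hmem with ⟨hs, rfl⟩|⟨hs, rfl⟩|⟨hs, rfl⟩|⟨hs, rfl⟩|⟨hs, rfl⟩|⟨hs, rfl⟩|⟨hs, rfl⟩|⟨hs, rfl⟩|⟨hs, rfl⟩|⟨hs, rfl⟩|⟨hs, rfl⟩|⟨hs, rfl⟩|⟨hs, rfl⟩|⟨hs, rfl⟩|⟨hs, rfl⟩|⟨hs, rfl⟩|⟨hs, rfl⟩|⟨hs, rfl⟩|⟨hs, rfl⟩|⟨hs, rfl⟩|⟨hs, rfl⟩|⟨hs, rfl⟩|⟨hs, rfl⟩|⟨hs, rfl⟩|⟨hs, rfl⟩|⟨hs, rfl⟩|⟨hs, rfl⟩|⟨hs, rfl⟩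
  · obtain rfl : tk = ("(album)" : String).toList := by
      have := congrArg String.toList hs; simpa using this
    refine ⟨by norm_num, by norm_num, by norm_num [pvCat], ?_⟩
    refine ⟨"(album)", by simp [pvKwsOf], ?_⟩
    exact (pvTok_iff ['a', 'l', 'b', 'u', 'm'] cs (by intro c hc; fin_cases hc <;> exact ⟨by decide, by decide⟩)).mp htk
  · obtain rfl : tk = ("(song)" : String).toList := by
      have := congrArg String.toList hs; simpa using this
    refine ⟨by norm_num, by norm_num, by norm_num [pvCat], ?_⟩
    refine ⟨"(song)", by simp [pvKwsOf], ?_⟩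
    exact (pvTok_iff ['s', 'o', 'n', 'g'] cs (by intro c hc; fin_cases hc <;> exact ⟨by decide, by decide⟩)).mp htk
  · obtain rfl : tk = ("(band)" : String).toList := by
      have := congrArg String.toList hs; simpa using this
    refine ⟨by norm_num, by norm_num, by norm_num [pvCat], ?_⟩
    refine ⟨"(band)", by simp [pvKwsOf], ?_⟩
    exact (pvTok_iff ['b', 'a', 'n', 'd'] cs (by intro c hc; fin_cases hc <;> exact ⟨by decide, by decide⟩)).mp htk
  · obtain rfl : tk = ("(footballer)" : String).toList := by
      have := congrArg String.toList hs; simpa using this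
    refine ⟨by norm_num, by norm_num, by norm_num [pvCat], ?_⟩
    refine ⟨"(footballer)", by simp [pvKwsOf], ?_⟩
    exact (pvTok_iff ['f', 'o', 'o', 't', 'b', 'a', 'l', 'l', 'e', 'r'] cs (by intro c hc; fin_cases hc <;> exact ⟨by decide, by decide⟩)).mp htk
  · obtain rfl : tk = ("(soccer)" : String).toList := by
      have := congrArg String.toList hs; simpa using this
    refine ⟨by norm_num, by norm_num, by norm_num [pvCat], ?_⟩
    refine ⟨"(soccer)", by simp [pvKwsOf], ?_⟩
    exact (pvTok_iff ['s', 'o', 'c', 'c', 'e', 'r'] cs (by intro c hc; fin_cases hc <;> exact ⟨by decide, by decide⟩)).mp htk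
  · obtain rfl : tk = ("(american football)" : String).toList := by
      have := congrArg String.toList hs; simpa using this
    refine ⟨by norm_num, by norm_num, by norm_num [pvCat], ?_⟩
    refine ⟨"(american football)", by simp [pvKwsOf], ?_⟩
    exact (pvTok_iff ['a', 'm', 'e', 'r', 'i', 'c', 'a', 'n', ' ', 'f', 'o', 'o', 't', 'b', 'a', 'l', 'l'] cs (by intro c hc; fin_cases hc <;> exact ⟨by decide, by decide⟩)).mp htk
  · obtain rfl : tk = ("(baseball)" : String).toList := by
      have := congrArg String.toList hs; simpa using this
    refine ⟨by norm_num, by norm_num, by norm_num [pvCat], ?_⟩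
    refine ⟨"(baseball)", by simp [pvKwsOf], ?_⟩
    exact (pvTok_iff ['b', 'a', 's', 'e', 'b', 'a', 'l', 'l'] cs (by intro c hc; fin_cases hc <;> exact ⟨by decide, by decide⟩)).mp htk
  · obtain rfl : tk = ("(basketball)" : String).toList := by
      have := congrArg String.toList hs; simpa using this
    refine ⟨by norm_num, by norm_num, by norm_num [pvCat], ?_⟩
    refine ⟨"(basketball)", by simp [pvKwsOf], ?_⟩
    exact (pvTok_iff ['b', 'a', 's', 'k', 'e', 't', 'b', 'a', 'l', 'l'] cs (by intro c hc; fin_cases hc <;> exact ⟨by decide, by decide⟩)).mp htk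
  · obtain rfl : tk = ("(hockey)" : String).toList := by
      have := congrArg String.toList hs; simpa using this
    refine ⟨by norm_num, by norm_num, by norm_num [pvCat], ?_⟩
    refine ⟨"(hockey)", by simp [pvKwsOf], ?_⟩
    exact (pvTok_iff ['h', 'o', 'c', 'k', 'e', 'y'] cs (by intro c hc; fin_cases hc <;> exact ⟨by decide, by decide⟩)).mp htk
  · obtain rfl : tk = ("(film)" : String).toList := by
      have := congrArg String.toList hs; simpa using this
    refine ⟨by norm_num, by norm_num, by norm_num [pvCat], ?_⟩
    refine ⟨"(film)", by simp [pvKwsOf], ?_⟩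
    exact (pvTok_iff ['f', 'i', 'l', 'm'] cs (by intro c hc; fin_cases hc <;> exact ⟨by decide, by decide⟩)).mp htk
  · obtain rfl : tk = ("(actor)" : String).toList := by
      have := congrArg String.toList hs; simpa using this
    refine ⟨by norm_num, by norm_num, by norm_num [pvCat], ?_⟩
    refine ⟨"(actor)", by simp [pvKwsOf], ?_⟩
    exact (pvTok_iff ['a', 'c', 't', 'o', 'r'] cs (by intro c hc; fin_cases hc <;> exact ⟨by decide, by decide⟩)).mp htk
  · obtain rfl : tk = ("(actress)" : String).toList := by
      have := congrArg String.toList hs; simpa using this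
    refine ⟨by norm_num, by norm_num, by norm_num [pvCat], ?_⟩
    refine ⟨"(actress)", by simp [pvKwsOf], ?_⟩
    exact (pvTok_iff ['a', 'c', 't', 'r', 'e', 's', 's'] cs (by intro c hc; fin_cases hc <;> exact ⟨by decide, by decide⟩)).mp htk
  · obtain rfl : tk = ("(politician)" : String).toList := by
      have := congrArg String.toList hs; simpa using this
    refine ⟨by norm_num, by norm_num, by norm_num [pvCat], ?_⟩
    refine ⟨"(politician)", by simp [pvKwsOf], ?_⟩
    exact (pvTok_iff ['p', 'o', 'l', 'i', 't', 'i', 'c', 'i', 'a', 'n'] cs (by intro c hc; fin_cases hc <;> exact ⟨by decide, by decide⟩)).mp htk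
  · obtain rfl : tk = ("(president)" : String).toList := by
      have := congrArg String.toList hs; simpa using this
    refine ⟨by norm_num, by norm_num, by norm_num [pvCat], ?_⟩
    refine ⟨"(president)", by simp [pvKwsOf], ?_⟩
    exact (pvTok_iff ['p', 'r', 'e', 's', 'i', 'd', 'e', 'n', 't'] cs (by intro c hc; fin_cases hc <;> exact ⟨by decide, by decide⟩)).mp htk
  · obtain rfl : tk = ("(prime minister)" : String).toList := by
      have := congrArg String.toList hs; simpa using this
    refine ⟨by norm_num, by norm_num, by norm_num [pvCat], ?_⟩
    refine ⟨"(prime minister)", by simp [pvKwsOf], ?_⟩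
    exact (pvTok_iff ['p', 'r', 'i', 'm', 'e', ' ', 'm', 'i', 'n', 'i', 's', 't', 'e', 'r'] cs (by intro c hc; fin_cases hc <;> exact ⟨by decide, by decide⟩)).mp htk
  · obtain rfl : tk = ("(scientist)" : String).toList := by
      have := congrArg String.toList hs; simpa using this
    refine ⟨by norm_num, by norm_num, by norm_num [pvCat], ?_⟩
    refine ⟨"(scientist)", by simp [pvKwsOf], ?_⟩
    exact (pvTok_iff ['s', 'c', 'i', 'e', 'n', 't', 'i', 's', 't'] cs (by intro c hc; fin_cases hc <;> exact ⟨by decide, by decide⟩)).mp htk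
  · obtain rfl : tk = ("(researcher)" : String).toList := by
      have := congrArg String.toList hs; simpa using this
    refine ⟨by norm_num, by norm_num, by norm_num [pvCat], ?_⟩
    refine ⟨"(researcher)", by simp [pvKwsOf], ?_⟩
    exact (pvTok_iff ['r', 'e', 's', 'e', 'a', 'r', 'c', 'h', 'e', 'r'] cs (by intro c hc; fin_cases hc <;> exact ⟨by decide, by decide⟩)).mp htk
  · obtain rfl : tk = ("(video game)" : String).toList := by
      have := congrArg String.toList hs; simpa using this
    refine ⟨by norm_num, by norm_num, by norm_num [pvCat], ?_⟩
    refine ⟨"(video game)", by simp [pvKwsOf], ?_⟩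
    exact (pvTok_iff ['v', 'i', 'd', 'e', 'o', ' ', 'g', 'a', 'm', 'e'] cs (by intro c hc; fin_cases hc <;> exact ⟨by decide, by decide⟩)).mp htk
  · obtain rfl : tk = ("(console)" : String).toList := by
      have := congrArg String.toList hs; simpa using this
    refine ⟨by norm_num, by norm_num, by norm_num [pvCat], ?_⟩
    refine ⟨"(console)", by simp [pvKwsOf], ?_⟩
    exact (pvTok_iff ['c', 'o', 'n', 's', 'o', 'l', 'e'] cs (by intro c hc; fin_cases hc <;> exact ⟨by decide, by decide⟩)).mp htk
  · obtain rfl : tk = ("(disaster)" : String).toList := by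
      have := congrArg String.toList hs; simpa using this
    refine ⟨by norm_num, by norm_num, by norm_num [pvCat], ?_⟩
    refine ⟨"(disaster)", by simp [pvKwsOf], ?_⟩
    exact (pvTok_iff ['d', 'i', 's', 'a', 's', 't', 'e', 'r'] cs (by intro c hc; fin_cases hc <;> exact ⟨by decide, by decide⟩)).mp htk
  · obtain rfl : tk = ("(mass shooting)" : String).toList := by
      have := congrArg String.toList hs; simpa using this
    refine ⟨by norm_num, by norm_num, by norm_num [pvCat], ?_⟩
    refine ⟨"(mass shooting)", by simp [pvKwsOf], ?_⟩
    exact (pvTok_iff ['m', 'a', 's', 's', ' ', 's', 'h', 'o', 'o', 't', 'i', 'n', 'g'] cs (by intro c hc; fin_cases hc <;> exact ⟨by decide, by decide⟩)).mp htk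
  · obtain rfl : tk = ("(war)" : String).toList := by
      have := congrArg String.toList hs; simpa using this
    refine ⟨by norm_num, by norm_num, by norm_num [pvCat], ?_⟩
    refine ⟨"(war)", by simp [pvKwsOf], ?_⟩
    exact (pvTok_iff ['w', 'a', 'r'] cs (by intro c hc; fin_cases hc <;> exact ⟨by decide, by decide⟩)).mp htk
  · obtain rfl : tk = ("(religion)" : String).toList := by
      have := congrArg String.toList hs; simpa using this
    refine ⟨by norm_num, by norm_num, by norm_num [pvCat], ?_⟩
    refine ⟨"(religion)", by simp [pvKwsOf], ?_⟩
    exact (pvTok_iff ['r', 'e', 'l', 'i', 'g', 'i', 'o', 'n'] cs (by intro c hc; fin_cases hc <;> exact ⟨by decide, by decide⟩)).mp htk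
  · obtain rfl : tk = ("(church)" : String).toList := by
      have := congrArg String.toList hs; simpa using this
    refine ⟨by norm_num, by norm_num, by norm_num [pvCat], ?_⟩
    refine ⟨"(church)", by simp [pvKwsOf], ?_⟩
    exact (pvTok_iff ['c', 'h', 'u', 'r', 'c', 'h'] cs (by intro c hc; fin_cases hc <;> exact ⟨by decide, by decide⟩)).mp htk
  · obtain rfl : tk = ("(temple)" : String).toList := by
      have := congrArg String.toList hs; simpa using this
    refine ⟨by norm_num, by norm_num, by norm_num [pvCat], ?_⟩
    refine ⟨"(temple)", by simp [pvKwsOf], ?_⟩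
    exact (pvTok_iff ['t', 'e', 'm', 'p', 'l', 'e'] cs (by intro c hc; fin_cases hc <;> exact ⟨by decide, by decide⟩)).mp htk
  · obtain rfl : tk = ("(tv show)" : String).toList := by
      have := congrArg String.toList hs; simpa using this
    refine ⟨by norm_num, by norm_num, by norm_num [pvCat], ?_⟩
    refine ⟨"(tv show)", by simp [pvKwsOf], ?_⟩
    exact (pvTok_iff ['t', 'v', ' ', 's', 'h', 'o', 'w'] cs (by intro c hc; fin_cases hc <;> exact ⟨by decide, by decide⟩)).mp htk
  · obtain rfl : tk = ("(tv series)" : String).toList := by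
      have := congrArg String.toList hs; simpa using this
    refine ⟨by norm_num, by norm_num, by norm_num [pvCat], ?_⟩
    refine ⟨"(tv series)", by simp [pvKwsOf], ?_⟩
    exact (pvTok_iff ['t', 'v', ' ', 's', 'e', 'r', 'i', 'e', 's'] cs (by intro c hc; fin_cases hc <;> exact ⟨by decide, by decide⟩)).mp htk
  · obtain rfl : tk = ("(show)" : String).toList := by
      have := congrArg String.toList hs; simpa using this
    refine ⟨by norm_num, by norm_num, by norm_num [pvCat], ?_⟩
    refine ⟨"(show)", by simp [pvKwsOf], ?_⟩
    exact (pvTok_iff ['s', 'h', 'o', 'w'] cs (by intro c hc; fin_cases hc <;> exact ⟨by decide, by decide⟩)).mp htk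

-- a matched rule contributes its table row to the hits
theorem pvFlag_mem (cs : List Char) (r : Int) (h : pvFlag cs r) : (r, pvCat r) ∈ pvHits cs := by
  obtain ⟨kw, hkw, hinf⟩ := h
  by_cases h0 : r = 0
  · subst h0
    simp only [pvKwsOf] at hkw
    norm_num at hkw
    rcases hkw with rfl|rfl|rfl
    · exact List.mem_filterMap.mpr ⟨("(album)" : String).toList,
        (pvTok_iff ['a', 'l', 'b', 'u', 'm'] cs (by intro c hc; fin_cases hc <;> exact ⟨by decide, by decide⟩)).mpr hinf, by decide⟩
    · exact List.mem_filterMap.mpr ⟨("(song)" : String).toList,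
        (pvTok_iff ['s', 'o', 'n', 'g'] cs (by intro c hc; fin_cases hc <;> exact ⟨by decide, by decide⟩)).mpr hinf, by decide⟩
    · exact List.mem_filterMap.mpr ⟨("(band)" : String).toList,
        (pvTok_iff ['b', 'a', 'n', 'd'] cs (by intro c hc; fin_cases hc <;> exact ⟨by decide, by decide⟩)).mpr hinf, by decide⟩
  by_cases h1 : r = 1
  · subst h1
    simp only [pvKwsOf] at hkw
    norm_num at hkw
    rcases hkw with rfl|rfl
    · exact List.mem_filterMap.mpr ⟨("(footballer)" : String).toList,
        (pvTok_iff ['f', 'o', 'o', 't', 'b', 'a', 'l', 'l', 'e', 'r'] cs (by intro c hc; fin_cases hc <;> exact ⟨by decide, by decide⟩)).mpr hinf, by decide⟩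
    · exact List.mem_filterMap.mpr ⟨("(soccer)" : String).toList,
        (pvTok_iff ['s', 'o', 'c', 'c', 'e', 'r'] cs (by intro c hc; fin_cases hc <;> exact ⟨by decide, by decide⟩)).mpr hinf, by decide⟩
  by_cases h2 : r = 2
  · subst h2
    simp only [pvKwsOf] at hkw
    norm_num at hkw
    rcases hkw with rfl|rfl|rfl|rfl
    · exact List.mem_filterMap.mpr ⟨("(american football)" : String).toList,
        (pvTok_iff ['a', 'm', 'e', 'r', 'i', 'c', 'a', 'n', ' ', 'f', 'o', 'o', 't', 'b', 'a', 'l', 'l'] cs (by intro c hc; fin_cases hc <;> exact ⟨by decide, by decide⟩)).mpr hinf, by decide⟩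
    · exact List.mem_filterMap.mpr ⟨("(baseball)" : String).toList,
        (pvTok_iff ['b', 'a', 's', 'e', 'b', 'a', 'l', 'l'] cs (by intro c hc; fin_cases hc <;> exact ⟨by decide, by decide⟩)).mpr hinf, by decide⟩
    · exact List.mem_filterMap.mpr ⟨("(basketball)" : String).toList,
        (pvTok_iff ['b', 'a', 's', 'k', 'e', 't', 'b', 'a', 'l', 'l'] cs (by intro c hc; fin_cases hc <;> exact ⟨by decide, by decide⟩)).mpr hinf, by decide⟩
    · exact List.mem_filterMap.mpr ⟨("(hockey)" : String).toList,
        (pvTok_iff ['h', 'o', 'c', 'k', 'e', 'y'] cs (by intro c hc; fin_cases hc <;> exact ⟨by decide, by decide⟩)).mpr hinf, by decide⟩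
  by_cases h3 : r = 3
  · subst h3
    simp only [pvKwsOf] at hkw
    norm_num at hkw
    rcases hkw with rfl|rfl|rfl
    · exact List.mem_filterMap.mpr ⟨("(film)" : String).toList,
        (pvTok_iff ['f', 'i', 'l', 'm'] cs (by intro c hc; fin_cases hc <;> exact ⟨by decide, by decide⟩)).mpr hinf, by decide⟩
    · exact List.mem_filterMap.mpr ⟨("(actor)" : String).toList,
        (pvTok_iff ['a', 'c', 't', 'o', 'r'] cs (by intro c hc; fin_cases hc <;> exact ⟨by decide, by decide⟩)).mpr hinf, by decide⟩
    · exact List.mem_filterMap.mpr ⟨("(actress)" : String).toList,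
        (pvTok_iff ['a', 'c', 't', 'r', 'e', 's', 's'] cs (by intro c hc; fin_cases hc <;> exact ⟨by decide, by decide⟩)).mpr hinf, by decide⟩
  by_cases h4 : r = 4
  · subst h4
    simp only [pvKwsOf] at hkw
    norm_num at hkw
    rcases hkw with rfl|rfl|rfl
    · exact List.mem_filterMap.mpr ⟨("(politician)" : String).toList,
        (pvTok_iff ['p', 'o', 'l', 'i', 't', 'i', 'c', 'i', 'a', 'n'] cs (by intro c hc; fin_cases hc <;> exact ⟨by decide, by decide⟩)).mpr hinf, by decide⟩
    · exact List.mem_filterMap.mpr ⟨("(president)" : String).toList,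
        (pvTok_iff ['p', 'r', 'e', 's', 'i', 'd', 'e', 'n', 't'] cs (by intro c hc; fin_cases hc <;> exact ⟨by decide, by decide⟩)).mpr hinf, by decide⟩
    · exact List.mem_filterMap.mpr ⟨("(prime minister)" : String).toList,
        (pvTok_iff ['p', 'r', 'i', 'm', 'e', ' ', 'm', 'i', 'n', 'i', 's', 't', 'e', 'r'] cs (by intro c hc; fin_cases hc <;> exact ⟨by decide, by decide⟩)).mpr hinf, by decide⟩
  by_cases h5 : r = 5
  · subst h5
    simp only [pvKwsOf] at hkw
    norm_num at hkw
    rcases hkw with rfl|rfl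
    · exact List.mem_filterMap.mpr ⟨("(scientist)" : String).toList,
        (pvTok_iff ['s', 'c', 'i', 'e', 'n', 't', 'i', 's', 't'] cs (by intro c hc; fin_cases hc <;> exact ⟨by decide, by decide⟩)).mpr hinf, by decide⟩
    · exact List.mem_filterMap.mpr ⟨("(researcher)" : String).toList,
        (pvTok_iff ['r', 'e', 's', 'e', 'a', 'r', 'c', 'h', 'e', 'r'] cs (by intro c hc; fin_cases hc <;> exact ⟨by decide, by decide⟩)).mpr hinf, by decide⟩
  by_cases h6 : r = 6
  · subst h6
    simp only [pvKwsOf] at hkw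
    norm_num at hkw
    rcases hkw with rfl|rfl
    · exact List.mem_filterMap.mpr ⟨("(video game)" : String).toList,
        (pvTok_iff ['v', 'i', 'd', 'e', 'o', ' ', 'g', 'a', 'm', 'e'] cs (by intro c hc; fin_cases hc <;> exact ⟨by decide, by decide⟩)).mpr hinf, by decide⟩
    · exact List.mem_filterMap.mpr ⟨("(console)" : String).toList,
        (pvTok_iff ['c', 'o', 'n', 's', 'o', 'l', 'e'] cs (by intro c hc; fin_cases hc <;> exact ⟨by decide, by decide⟩)).mpr hinf, by decide⟩
  by_cases h7 : r = 7
  · subst h7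
    simp only [pvKwsOf] at hkw
    norm_num at hkw
    rcases hkw with rfl|rfl|rfl
    · exact List.mem_filterMap.mpr ⟨("(disaster)" : String).toList,
        (pvTok_iff ['d', 'i', 's', 'a', 's', 't', 'e', 'r'] cs (by intro c hc; fin_cases hc <;> exact ⟨by decide, by decide⟩)).mpr hinf, by decide⟩
    · exact List.mem_filterMap.mpr ⟨("(mass shooting)" : String).toList,
        (pvTok_iff ['m', 'a', 's', 's', ' ', 's', 'h', 'o', 'o', 't', 'i', 'n', 'g'] cs (by intro c hc; fin_cases hc <;> exact ⟨by decide, by decide⟩)).mpr hinf, by decide⟩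
    · exact List.mem_filterMap.mpr ⟨("(war)" : String).toList,
        (pvTok_iff ['w', 'a', 'r'] cs (by intro c hc; fin_cases hc <;> exact ⟨by decide, by decide⟩)).mpr hinf, by decide⟩
  by_cases h8 : r = 8
  · subst h8
    simp only [pvKwsOf] at hkw
    norm_num at hkw
    rcases hkw with rfl|rfl|rfl
    · exact List.mem_filterMap.mpr ⟨("(religion)" : String).toList,
        (pvTok_iff ['r', 'e', 'l', 'i', 'g', 'i', 'o', 'n'] cs (by intro c hc; fin_cases hc <;> exact ⟨by decide, by decide⟩)).mpr hinf, by decide⟩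
    · exact List.mem_filterMap.mpr ⟨("(church)" : String).toList,
        (pvTok_iff ['c', 'h', 'u', 'r', 'c', 'h'] cs (by intro c hc; fin_cases hc <;> exact ⟨by decide, by decide⟩)).mpr hinf, by decide⟩
    · exact List.mem_filterMap.mpr ⟨("(temple)" : String).toList,
        (pvTok_iff ['t', 'e', 'm', 'p', 'l', 'e'] cs (by intro c hc; fin_cases hc <;> exact ⟨by decide, by decide⟩)).mpr hinf, by decide⟩
  by_cases h9 : r = 9
  · subst h9
    simp only [pvKwsOf] at hkw
    norm_num at hkw
    rcases hkw with rfl|rfl|rfl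
    · exact List.mem_filterMap.mpr ⟨("(tv show)" : String).toList,
        (pvTok_iff ['t', 'v', ' ', 's', 'h', 'o', 'w'] cs (by intro c hc; fin_cases hc <;> exact ⟨by decide, by decide⟩)).mpr hinf, by decide⟩
    · exact List.mem_filterMap.mpr ⟨("(tv series)" : String).toList,
        (pvTok_iff ['t', 'v', ' ', 's', 'e', 'r', 'i', 'e', 's'] cs (by intro c hc; fin_cases hc <;> exact ⟨by decide, by decide⟩)).mpr hinf, by decide⟩
    · exact List.mem_filterMap.mpr ⟨("(show)" : String).toList,
        (pvTok_iff ['s', 'h', 'o', 'w'] cs (by intro c hc; fin_cases hc <;> exact ⟨by decide, by decide⟩)).mpr hinf, by decide⟩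
  simp [pvKwsOf, h0, h1, h2, h3, h4, h5, h6, h7, h8, h9] at hkw

theorem pvSel_hits (cs : List Char) (r : Int) (hflag : pvFlag cs r)
    (hmin : ∀ k, 0 ≤ k → k < r → ¬ pvFlag cs k) :
    ∃ p, pvSel (pvHits cs) = some p ∧ p.2 = pvCat r := by
  have hmem := pvFlag_mem cs r hflag
  cases h : pvSel (pvHits cs) with
  | none => rw [pvSel_eq_none] at h; rw [h] at hmem; simp at hmem
  | some p =>
    obtain ⟨hp, hmin'⟩ := pvSel_spec _ _ h
    obtain ⟨hp0, hp9, hcat, hfl⟩ := pvHits_char cs p hp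
    have h1 : p.1 ≤ r := hmin' _ hmem
    have h2 : r ≤ p.1 := by
      by_contra hlt
      exact hmin p.1 hp0 (by omega) hfl
    exact ⟨p, rfl, by rw [hcat, le_antisymm h1 h2]⟩

theorem pvSel_hits_none (cs : List Char) (hnone : ∀ k, 0 ≤ k → k ≤ 9 → ¬ pvFlag cs k) :
    pvSel (pvHits cs) = none := by
  rw [pvSel_eq_none]
  rw [List.eq_nil_iff_forall_not_mem]
  intro p hp
  obtain ⟨hp0, hp9, _, hfl⟩ := pvHits_char cs p hp
  exact hnone p.1 hp0 hp9 hfl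

theorem pvFlag0_iff (t : String) : pvFlag t.toList 0 ↔ (PySem.Str.isIn "(album)" t || PySem.Str.isIn "(song)" t || PySem.Str.isIn "(band)" t) = true := by
  simp [pvFlag, pvKwsOf, PySem.Str.isIn, PySem.Chars.isIn_iff_infix, or_assoc]

theorem pvFlag1_iff (t : String) : pvFlag t.toList 1 ↔ (PySem.Str.isIn "(footballer)" t || PySem.Str.isIn "(soccer)" t) = true := by
  simp [pvFlag, pvKwsOf, PySem.Str.isIn, PySem.Chars.isIn_iff_infix]

theorem pvFlag2_iff (t : String) : pvFlag t.toList 2 ↔ (PySem.Str.isIn "(american football)" t || PySem.Str.isIn "(baseball)" t || PySem.Str.isIn "(basketball)" t || PySem.Str.isIn "(hockey)" t) = true := by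
  simp [pvFlag, pvKwsOf, PySem.Str.isIn, PySem.Chars.isIn_iff_infix, or_assoc]

theorem pvFlag3_iff (t : String) : pvFlag t.toList 3 ↔ (PySem.Str.isIn "(film)" t || PySem.Str.isIn "(actor)" t || PySem.Str.isIn "(actress)" t) = true := by
  simp [pvFlag, pvKwsOf, PySem.Str.isIn, PySem.Chars.isIn_iff_infix, or_assoc]

theorem pvFlag4_iff (t : String) : pvFlag t.toList 4 ↔ (PySem.Str.isIn "(politician)" t || PySem.Str.isIn "(president)" t || PySem.Str.isIn "(prime minister)" t) = true := by
  simp [pvFlag, pvKwsOf, PySem.Str.isIn, PySem.Chars.isIn_iff_infix, or_assoc]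

theorem pvFlag5_iff (t : String) : pvFlag t.toList 5 ↔ (PySem.Str.isIn "(scientist)" t || PySem.Str.isIn "(researcher)" t) = true := by
  simp [pvFlag, pvKwsOf, PySem.Str.isIn, PySem.Chars.isIn_iff_infix]

theorem pvFlag6_iff (t : String) : pvFlag t.toList 6 ↔ (PySem.Str.isIn "(video game)" t || PySem.Str.isIn "(console)" t) = true := by
  simp [pvFlag, pvKwsOf, PySem.Str.isIn, PySem.Chars.isIn_iff_infix]

theorem pvFlag7_iff (t : String) : pvFlag t.toList 7 ↔ (PySem.Str.isIn "(disaster)" t || PySem.Str.isIn "(mass shooting)" t || PySem.Str.isIn "(war)" t) = true := by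
  simp [pvFlag, pvKwsOf, PySem.Str.isIn, PySem.Chars.isIn_iff_infix, or_assoc]

theorem pvFlag8_iff (t : String) : pvFlag t.toList 8 ↔ (PySem.Str.isIn "(religion)" t || PySem.Str.isIn "(church)" t || PySem.Str.isIn "(temple)" t) = true := by
  simp [pvFlag, pvKwsOf, PySem.Str.isIn, PySem.Chars.isIn_iff_infix, or_assoc]

theorem pvFlag9_iff (t : String) : pvFlag t.toList 9 ↔ (PySem.Str.isIn "(tv show)" t || PySem.Str.isIn "(tv series)" t || PySem.Str.isIn "(show)" t) = true := by
  simp [pvFlag, pvKwsOf, PySem.Str.isIn, PySem.Chars.isIn_iff_infix, or_assoc]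

-- per-title: B's scanner result = A's if/elif chain value
theorem pvLabel_eq (t : String) :
    (match (t.toList.foldl pvStep (none, none)).1 with
     | none => "unlabeled" | some b => b.2) =
    (if PySem.Str.isIn "(album)" t || PySem.Str.isIn "(song)" t || PySem.Str.isIn "(band)" t then "music"
     else if PySem.Str.isIn "(footballer)" t || PySem.Str.isIn "(soccer)" t then "football (soccer)"
     else if PySem.Str.isIn "(american football)" t || PySem.Str.isIn "(baseball)" t || PySem.Str.isIn "(basketball)" t || PySem.Str.isIn "(hockey)" t then "sports"
     else if PySem.Str.isIn "(film)" t || PySem.Str.isIn "(actor)" t || PySem.Str.isIn "(actress)" t then "movies"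
     else if PySem.Str.isIn "(politician)" t || PySem.Str.isIn "(president)" t || PySem.Str.isIn "(prime minister)" t then "politics"
     else if PySem.Str.isIn "(scientist)" t || PySem.Str.isIn "(researcher)" t then "science"
     else if PySem.Str.isIn "(video game)" t || PySem.Str.isIn "(console)" t then "videogames"
     else if PySem.Str.isIn "(disaster)" t || PySem.Str.isIn "(mass shooting)" t || PySem.Str.isIn "(war)" t then "conflicts"
     else if PySem.Str.isIn "(religion)" t || PySem.Str.isIn "(church)" t || PySem.Str.isIn "(temple)" t then "religion"
     else if PySem.Str.isIn "(tv show)" t || PySem.Str.isIn "(tv series)" t || PySem.Str.isIn "(show)" t then "media"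
     else "unlabeled") := by
  have hfold : (t.toList.foldl pvStep (none, none)).1 = pvSel (pvHits t.toList) := by
    rw [pvFold_eq]; rfl
  rw [hfold]
  by_cases h0 : (PySem.Str.isIn "(album)" t || PySem.Str.isIn "(song)" t || PySem.Str.isIn "(band)" t) = true
  · have hmin : ∀ k, 0 ≤ k → k < 0 → ¬ pvFlag t.toList k := by
      intro k hk0 hk1 _; omega
    obtain ⟨p, hsel, hcat⟩ := pvSel_hits t.toList 0 ((pvFlag0_iff t).mpr h0) hmin
    rw [hsel, if_pos h0]
    simp [hcat, pvCat]
  by_cases h1 : (PySem.Str.isIn "(footballer)" t || PySem.Str.isIn "(soccer)" t) = true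
  · have hmin : ∀ k, 0 ≤ k → k < 1 → ¬ pvFlag t.toList k := by
      intro k hk0 hk1 hfl
      have hk : k = 0 := by omega
      rcases hk with rfl
      · exact h0 ((pvFlag0_iff t).mp hfl)
    obtain ⟨p, hsel, hcat⟩ := pvSel_hits t.toList 1 ((pvFlag1_iff t).mpr h1) hmin
    rw [hsel, if_neg h0, if_pos h1]
    simp [hcat, pvCat]
  by_cases h2 : (PySem.Str.isIn "(american football)" t || PySem.Str.isIn "(baseball)" t || PySem.Str.isIn "(basketball)" t || PySem.Str.isIn "(hockey)" t) = true
  · have hmin : ∀ k, 0 ≤ k → k < 2 → ¬ pvFlag t.toList k := by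
      intro k hk0 hk1 hfl
      have hk : k = 0 ∨ k = 1 := by omega
      rcases hk with rfl|rfl
      · exact h0 ((pvFlag0_iff t).mp hfl)
      · exact h1 ((pvFlag1_iff t).mp hfl)
    obtain ⟨p, hsel, hcat⟩ := pvSel_hits t.toList 2 ((pvFlag2_iff t).mpr h2) hmin
    rw [hsel, if_neg h0, if_neg h1, if_pos h2]
    simp [hcat, pvCat]
  by_cases h3 : (PySem.Str.isIn "(film)" t || PySem.Str.isIn "(actor)" t || PySem.Str.isIn "(actress)" t) = true
  · have hmin : ∀ k, 0 ≤ k → k < 3 → ¬ pvFlag t.toList k := by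
      intro k hk0 hk1 hfl
      have hk : k = 0 ∨ k = 1 ∨ k = 2 := by omega
      rcases hk with rfl|rfl|rfl
      · exact h0 ((pvFlag0_iff t).mp hfl)
      · exact h1 ((pvFlag1_iff t).mp hfl)
      · exact h2 ((pvFlag2_iff t).mp hfl)
    obtain ⟨p, hsel, hcat⟩ := pvSel_hits t.toList 3 ((pvFlag3_iff t).mpr h3) hmin
    rw [hsel, if_neg h0, if_neg h1, if_neg h2, if_pos h3]
    simp [hcat, pvCat]
  by_cases h4 : (PySem.Str.isIn "(politician)" t || PySem.Str.isIn "(president)" t || PySem.Str.isIn "(prime minister)" t) = true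
  · have hmin : ∀ k, 0 ≤ k → k < 4 → ¬ pvFlag t.toList k := by
      intro k hk0 hk1 hfl
      have hk : k = 0 ∨ k = 1 ∨ k = 2 ∨ k = 3 := by omega
      rcases hk with rfl|rfl|rfl|rfl
      · exact h0 ((pvFlag0_iff t).mp hfl)
      · exact h1 ((pvFlag1_iff t).mp hfl)
      · exact h2 ((pvFlag2_iff t).mp hfl)
      · exact h3 ((pvFlag3_iff t).mp hfl)
    obtain ⟨p, hsel, hcat⟩ := pvSel_hits t.toList 4 ((pvFlag4_iff t).mpr h4) hmin
    rw [hsel, if_neg h0, if_neg h1, if_neg h2, if_neg h3, if_pos h4]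
    simp [hcat, pvCat]
  by_cases h5 : (PySem.Str.isIn "(scientist)" t || PySem.Str.isIn "(researcher)" t) = true
  · have hmin : ∀ k, 0 ≤ k → k < 5 → ¬ pvFlag t.toList k := by
      intro k hk0 hk1 hfl
      have hk : k = 0 ∨ k = 1 ∨ k = 2 ∨ k = 3 ∨ k = 4 := by omega
      rcases hk with rfl|rfl|rfl|rfl|rfl
      · exact h0 ((pvFlag0_iff t).mp hfl)
      · exact h1 ((pvFlag1_iff t).mp hfl)
      · exact h2 ((pvFlag2_iff t).mp hfl)
      · exact h3 ((pvFlag3_iff t).mp hfl)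
      · exact h4 ((pvFlag4_iff t).mp hfl)
    obtain ⟨p, hsel, hcat⟩ := pvSel_hits t.toList 5 ((pvFlag5_iff t).mpr h5) hmin
    rw [hsel, if_neg h0, if_neg h1, if_neg h2, if_neg h3, if_neg h4, if_pos h5]
    simp [hcat, pvCat]
  by_cases h6 : (PySem.Str.isIn "(video game)" t || PySem.Str.isIn "(console)" t) = true
  · have hmin : ∀ k, 0 ≤ k → k < 6 → ¬ pvFlag t.toList k := by
      intro k hk0 hk1 hfl
      have hk : k = 0 ∨ k = 1 ∨ k = 2 ∨ k = 3 ∨ k = 4 ∨ k = 5 := by omega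
      rcases hk with rfl|rfl|rfl|rfl|rfl|rfl
      · exact h0 ((pvFlag0_iff t).mp hfl)
      · exact h1 ((pvFlag1_iff t).mp hfl)
      · exact h2 ((pvFlag2_iff t).mp hfl)
      · exact h3 ((pvFlag3_iff t).mp hfl)
      · exact h4 ((pvFlag4_iff t).mp hfl)
      · exact h5 ((pvFlag5_iff t).mp hfl)
    obtain ⟨p, hsel, hcat⟩ := pvSel_hits t.toList 6 ((pvFlag6_iff t).mpr h6) hmin
    rw [hsel, if_neg h0, if_neg h1, if_neg h2, if_neg h3, if_neg h4, if_neg h5, if_pos h6]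
    simp [hcat, pvCat]
  by_cases h7 : (PySem.Str.isIn "(disaster)" t || PySem.Str.isIn "(mass shooting)" t || PySem.Str.isIn "(war)" t) = true
  · have hmin : ∀ k, 0 ≤ k → k < 7 → ¬ pvFlag t.toList k := by
      intro k hk0 hk1 hfl
      have hk : k = 0 ∨ k = 1 ∨ k = 2 ∨ k = 3 ∨ k = 4 ∨ k = 5 ∨ k = 6 := by omega
      rcases hk with rfl|rfl|rfl|rfl|rfl|rfl|rfl
      · exact h0 ((pvFlag0_iff t).mp hfl)
      · exact h1 ((pvFlag1_iff t).mp hfl)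
      · exact h2 ((pvFlag2_iff t).mp hfl)
      · exact h3 ((pvFlag3_iff t).mp hfl)
      · exact h4 ((pvFlag4_iff t).mp hfl)
      · exact h5 ((pvFlag5_iff t).mp hfl)
      · exact h6 ((pvFlag6_iff t).mp hfl)
    obtain ⟨p, hsel, hcat⟩ := pvSel_hits t.toList 7 ((pvFlag7_iff t).mpr h7) hmin
    rw [hsel, if_neg h0, if_neg h1, if_neg h2, if_neg h3, if_neg h4, if_neg h5, if_neg h6, if_pos h7]
    simp [hcat, pvCat]
  by_cases h8 : (PySem.Str.isIn "(religion)" t || PySem.Str.isIn "(church)" t || PySem.Str.isIn "(temple)" t) = true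
  · have hmin : ∀ k, 0 ≤ k → k < 8 → ¬ pvFlag t.toList k := by
      intro k hk0 hk1 hfl
      have hk : k = 0 ∨ k = 1 ∨ k = 2 ∨ k = 3 ∨ k = 4 ∨ k = 5 ∨ k = 6 ∨ k = 7 := by omega
      rcases hk with rfl|rfl|rfl|rfl|rfl|rfl|rfl|rfl
      · exact h0 ((pvFlag0_iff t).mp hfl)
      · exact h1 ((pvFlag1_iff t).mp hfl)
      · exact h2 ((pvFlag2_iff t).mp hfl)
      · exact h3 ((pvFlag3_iff t).mp hfl)
      · exact h4 ((pvFlag4_iff t).mp hfl)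
      · exact h5 ((pvFlag5_iff t).mp hfl)
      · exact h6 ((pvFlag6_iff t).mp hfl)
      · exact h7 ((pvFlag7_iff t).mp hfl)
    obtain ⟨p, hsel, hcat⟩ := pvSel_hits t.toList 8 ((pvFlag8_iff t).mpr h8) hmin
    rw [hsel, if_neg h0, if_neg h1, if_neg h2, if_neg h3, if_neg h4, if_neg h5, if_neg h6, if_neg h7, if_pos h8]
    simp [hcat, pvCat]
  by_cases h9 : (PySem.Str.isIn "(tv show)" t || PySem.Str.isIn "(tv series)" t || PySem.Str.isIn "(show)" t) = true
  · have hmin : ∀ k, 0 ≤ k → k < 9 → ¬ pvFlag t.toList k := by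
      intro k hk0 hk1 hfl
      have hk : k = 0 ∨ k = 1 ∨ k = 2 ∨ k = 3 ∨ k = 4 ∨ k = 5 ∨ k = 6 ∨ k = 7 ∨ k = 8 := by omega
      rcases hk with rfl|rfl|rfl|rfl|rfl|rfl|rfl|rfl|rfl
      · exact h0 ((pvFlag0_iff t).mp hfl)
      · exact h1 ((pvFlag1_iff t).mp hfl)
      · exact h2 ((pvFlag2_iff t).mp hfl)
      · exact h3 ((pvFlag3_iff t).mp hfl)
      · exact h4 ((pvFlag4_iff t).mp hfl)
      · exact h5 ((pvFlag5_iff t).mp hfl)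
      · exact h6 ((pvFlag6_iff t).mp hfl)
      · exact h7 ((pvFlag7_iff t).mp hfl)
      · exact h8 ((pvFlag8_iff t).mp hfl)
    obtain ⟨p, hsel, hcat⟩ := pvSel_hits t.toList 9 ((pvFlag9_iff t).mpr h9) hmin
    rw [hsel, if_neg h0, if_neg h1, if_neg h2, if_neg h3, if_neg h4, if_neg h5, if_neg h6, if_neg h7, if_neg h8, if_pos h9]
    simp [hcat, pvCat]
  have hnone : ∀ k, 0 ≤ k → k ≤ 9 → ¬ pvFlag t.toList k := by
    intro k hk0 hk9 hfl
    have hk : k = 0 ∨ k = 1 ∨ k = 2 ∨ k = 3 ∨ k = 4 ∨ k = 5 ∨ k = 6 ∨ k = 7 ∨ k = 8 ∨ k = 9 := by omega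
    rcases hk with rfl|rfl|rfl|rfl|rfl|rfl|rfl|rfl|rfl|rfl
    · exact h0 ((pvFlag0_iff t).mp hfl)
    · exact h1 ((pvFlag1_iff t).mp hfl)
    · exact h2 ((pvFlag2_iff t).mp hfl)
    · exact h3 ((pvFlag3_iff t).mp hfl)
    · exact h4 ((pvFlag4_iff t).mp hfl)
    · exact h5 ((pvFlag5_iff t).mp hfl)
    · exact h6 ((pvFlag6_iff t).mp hfl)
    · exact h7 ((pvFlag7_iff t).mp hfl)
    · exact h8 ((pvFlag8_iff t).mp hfl)
    · exact h9 ((pvFlag9_iff t).mp hfl)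
  have hsel : pvSel (pvHits t.toList) = none := pvSel_hits_none _ hnone
  rw [hsel, if_neg h0, if_neg h1, if_neg h2, if_neg h3, if_neg h4, if_neg h5, if_neg h6, if_neg h7, if_neg h8, if_neg h9]

-- A's branch chain inserts exactly B's scanned label
set_option maxHeartbeats 2000000 in
theorem chain_insert (labels : PySem.Dict String String) (t : String) :
    (if PySem.Str.isIn "(album)" t || PySem.Str.isIn "(song)" t || PySem.Str.isIn "(band)" t then labels.insert t "music"
     else if PySem.Str.isIn "(footballer)" t || PySem.Str.isIn "(soccer)" t then labels.insert t "football (soccer)"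
     else if PySem.Str.isIn "(american football)" t || PySem.Str.isIn "(baseball)" t || PySem.Str.isIn "(basketball)" t || PySem.Str.isIn "(hockey)" t then labels.insert t "sports"
     else if PySem.Str.isIn "(film)" t || PySem.Str.isIn "(actor)" t || PySem.Str.isIn "(actress)" t then labels.insert t "movies"
     else if PySem.Str.isIn "(politician)" t || PySem.Str.isIn "(president)" t || PySem.Str.isIn "(prime minister)" t then labels.insert t "politics"
     else if PySem.Str.isIn "(scientist)" t || PySem.Str.isIn "(researcher)" t then labels.insert t "science"
     else if PySem.Str.isIn "(video game)" t || PySem.Str.isIn "(console)" t then labels.insert t "videogames"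
     else if PySem.Str.isIn "(disaster)" t || PySem.Str.isIn "(mass shooting)" t || PySem.Str.isIn "(war)" t then labels.insert t "conflicts"
     else if PySem.Str.isIn "(religion)" t || PySem.Str.isIn "(church)" t || PySem.Str.isIn "(temple)" t then labels.insert t "religion"
     else if PySem.Str.isIn "(tv show)" t || PySem.Str.isIn "(tv series)" t || PySem.Str.isIn "(show)" t then labels.insert t "media"
     else labels.insert t "unlabeled") =
    labels.insert t (match (t.toList.foldl pvStep (none, none)).1 with
      | none => "unlabeled" | some b => b.2) := by
  rw [pvLabel_eq]
  split_ifs <;> rfl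

-- ===== VERDICT (by name: the statement is the Claim_ definition above) =====
set_option maxHeartbeats 1000000 in
theorem rule_based_labeling_spec : Claim_equal_rule_based_labeling := by
  intro data _
  unfold Spec_rule_based_labeling rule_based_labeling rule_based_labeling_alt
  congr 1
  apply PySem.List.foldl_congr_mem
  intro labels item _
  exact chain_insert labels _
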